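-- pv_equiv track=rewrite | github.com/anachroni-co/capibara6 | backend/execution/execution_loop.py | _fix_indentation_error
-- ===== SOURCE A (Python) =====
-- from typing import Dict, List, Any, Optional, Callable
--
-- def _fix_indentation_error(code: str, language: str, error: str) -> Optional[str]:
--     """Corrige errores de indentación."""
--     if language == 'python':
--         # Normalizar indentación a 4 espacios
--         lines = code.split('\n')
--         corrected_lines = []
--
--         for line in lines:
--             if line.strip():  # Si la línea no está vacía
--                 # Contar espacios/tabs al inicio
--                 indent = len(line) - len(line.lstrip())
--                 # Convertir a múltiplos de 4
--                 new_indent = (indent // 4) * 4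
--                 corrected_lines.append(' ' * new_indent + line.lstrip())
--             else:
--                 corrected_lines.append(line)
--
--         return '\n'.join(corrected_lines)
--
--     return None
-- ===== SOURCE B (Python) =====
-- from typing import Optional
--
-- def _fix_indentation_error(code: str, language: str, error: str) -> Optional[str]:
--     """Single character-level scan over the whole string (no split/strip/join):
--     for each line, measure the leading-whitespace run and rewrite it as
--     (run // 4) * 4 spaces unless the line holds nothing but whitespace."""
--     if language != 'python':
--         return None
--     out = []
--     rest = code
--     while True:
--         ws = 0
--         while ws < len(rest) and rest[ws] != '\n' and rest[ws].isspace():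
--             ws += 1
--         end = ws
--         while end < len(rest) and rest[end] != '\n':
--             end += 1
--         if ws < end:
--             out.append(' ' * ((ws // 4) * 4))
--         else:
--             out.append(rest[:ws])
--         out.append(rest[ws:end])
--         if end == len(rest):
--             break
--         out.append('\n')
--         rest = rest[end + 1:]
--     return ''.join(out)
-- ===== Notes on version B (the rewrite author's own statement) =====
-- stated objective: alternative
-- what changed: Replaces split('\n') + per-line strip/lstrip/rebuild + join with a single character-level scan that measures each line's leading-whitespace run and the line end in place and emits the corrected text as it goes.
import Mathlib
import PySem

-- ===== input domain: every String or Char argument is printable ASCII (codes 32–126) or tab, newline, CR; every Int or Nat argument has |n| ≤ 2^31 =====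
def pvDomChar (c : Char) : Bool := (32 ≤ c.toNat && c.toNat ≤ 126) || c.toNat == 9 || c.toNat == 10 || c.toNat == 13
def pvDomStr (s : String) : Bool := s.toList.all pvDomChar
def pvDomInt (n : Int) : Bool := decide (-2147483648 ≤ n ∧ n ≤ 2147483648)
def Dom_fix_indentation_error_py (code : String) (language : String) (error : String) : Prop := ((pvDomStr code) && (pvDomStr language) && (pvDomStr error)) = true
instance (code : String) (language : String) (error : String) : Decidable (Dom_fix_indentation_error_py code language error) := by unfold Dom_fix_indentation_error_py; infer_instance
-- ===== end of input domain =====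

-- B replaces A's split('\n') / per-line strip / join pipeline by a single character-level
-- scan of the string; equivalence is proved on all inputs (both functions are total).

-- ===== PORT A =====
-- per-line body kept inline, as in the Python loop
def fix_indentation_error_py (code : String) (language : String) (error : String) : Option String :=
  if language == "python" then
    let lines := PySem.Chars.splitOn code.toList ['\n']
    let corrected := lines.foldl (fun acc line =>
      if PySem.Chars.strip line ≠ [] then
        let stripped := PySem.Chars.lstrip line
        let indent : Int := PySem.List.len line - PySem.List.len stripped
        let newIndent : Int := PySem.Int.floordiv indent 4 * 4
        acc ++ [List.replicate newIndent.toNat ' ' ++ stripped]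
      else acc ++ [line]) ([] : List (List Char))
    some (String.ofList (PySem.Chars.join ['\n'] corrected))
  else none

-- ===== PORT B =====
-- Source B's inner `while` runs over leading whitespace (stopping at '\n') …
def pvWsRun : List Char → Nat
  | [] => 0
  | c :: cs => if c ≠ '\n' ∧ PySem.Chars.isspace c then pvWsRun cs + 1 else 0

-- … and to the end of the line
def pvNlRun : List Char → Nat
  | [] => 0
  | c :: cs => if c ≠ '\n' then pvNlRun cs + 1 else 0

theorem pvWsRun_le (cs : List Char) : pvWsRun cs ≤ cs.length := by
  induction cs with
  | nil => simp [pvWsRun]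
  | cons c cs ih => simp only [pvWsRun, List.length_cons]; split <;> omega

theorem pvNlRun_le (cs : List Char) : pvNlRun cs ≤ cs.length := by
  induction cs with
  | nil => simp [pvNlRun]
  | cons c cs ih => simp only [pvNlRun, List.length_cons]; split <;> omega

-- Source B's outer loop: one line per iteration, `rest = rest[end+1:]`
def pvAltScan (cs : List Char) : List Char :=
  let ws := pvWsRun cs
  let e := ws + pvNlRun (cs.drop ws)
  let head := (if ws < e then List.replicate ((ws / 4) * 4) ' ' else cs.take ws) ++
              (cs.drop ws).take (e - ws)
  if e = cs.length then head
  else head ++ '\n' :: pvAltScan (cs.drop (e + 1))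
termination_by cs.length
decreasing_by
  have h1 := pvWsRun_le cs
  have h2 := pvNlRun_le (cs.drop ws)
  simp only [List.length_drop] at *
  omega

def fix_indentation_error_py_alt (code : String) (language : String) (error : String) : Option String :=
  if language == "python" then some (String.ofList (pvAltScan code.toList)) else none

-- ===== PRECONDITION & SPEC =====
def Spec_fix_indentation_error_py (code : String) (language : String) (error : String) (out : Option String) : Prop := out = fix_indentation_error_py_alt code language error
instance (code : String) (language : String) (error : String) (out : Option String) : Decidable (Spec_fix_indentation_error_py code language error out) := by unfold Spec_fix_indentation_error_py; infer_instance

-- ===== CLAIM (what is proved, stated in full; the proofs are below) =====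
def Claim_equal_fix_indentation_error_py : Prop := ∀ (code : String) (language : String) (error : String), Dom_fix_indentation_error_py code language error → Spec_fix_indentation_error_py code language error (fix_indentation_error_py code language error)

-- ===== LEMMAS AND PROOFS =====

-- A's per-line transformation, as a function (proof-side characterisation)
def pvFixA (line : List Char) : List Char :=
  if PySem.Chars.strip line ≠ [] then
    List.replicate (PySem.Int.floordiv (PySem.List.len line - PySem.List.len (PySem.Chars.lstrip line)) 4 * 4).toNat ' '
      ++ PySem.Chars.lstrip line
  else line

theorem pv_go_noSep (l : List Char) : ∀ (fuel : Nat) (cur : List Char) (acc : List (List Char)),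
    '\n' ∉ l → PySem.Chars.splitOn.go ['\n'] fuel l cur acc = ((cur.reverse ++ l) :: acc).reverse := by
  induction l with
  | nil =>
    intro fuel cur acc _
    cases fuel with
    | zero => rw [PySem.Chars.splitOn.go]
    | succ f => rw [PySem.Chars.splitOn.go] <;> simp
  | cons c cs ih =>
    intro fuel cur acc h
    have hc : ('\n':Char) ≠ c := fun he => h (he ▸ List.mem_cons_self)
    have hcs : ('\n':Char) ∉ cs := fun he => h (List.mem_cons_of_mem _ he)
    cases fuel with
    | zero => rw [PySem.Chars.splitOn.go]
    | succ f =>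
      rw [PySem.Chars.splitOn.go]
      rw [if_neg (by simp [List.isPrefixOf, hc])]
      rw [ih f (c :: cur) acc hcs]
      simp

theorem pv_go_acc : ∀ (fuel : Nat) (l cur : List Char) (acc : List (List Char)),
    PySem.Chars.splitOn.go ['\n'] fuel l cur acc = acc.reverse ++ PySem.Chars.splitOn.go ['\n'] fuel l cur [] := by
  intro fuel
  induction fuel with
  | zero =>
    intro l cur acc
    rw [PySem.Chars.splitOn.go, PySem.Chars.splitOn.go]
    simp
  | succ f ih =>
    intro l cur acc
    cases l with
    | nil => rw [PySem.Chars.splitOn.go, PySem.Chars.splitOn.go] <;> simp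
    | cons c cs =>
      rw [PySem.Chars.splitOn.go]
      conv_rhs => rw [PySem.Chars.splitOn.go]
      by_cases hp : [('\n':Char)].isPrefixOf (c :: cs) = true
      · rw [if_pos hp, if_pos hp,
          ih _ [] (cur.reverse :: acc), ih _ [] (cur.reverse :: [])]
        simp
      · rw [if_neg hp, if_neg hp, ih _ (c :: cur) acc]

theorem pv_go_sep (l : List Char) : ∀ (fuel : Nat) (cur : List Char) (acc : List (List Char)) (rest : List Char),
    '\n' ∉ l → l.length < fuel →
    PySem.Chars.splitOn.go ['\n'] fuel (l ++ '\n' :: rest) cur acc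
      = PySem.Chars.splitOn.go ['\n'] (fuel - l.length - 1) rest [] ((cur.reverse ++ l) :: acc) := by
  induction l with
  | nil =>
    intro fuel cur acc rest _ hf
    cases fuel with
    | zero => omega
    | succ f =>
      simp only [List.nil_append]
      rw [PySem.Chars.splitOn.go]
      rw [if_pos (by simp [List.isPrefixOf])]
      simp
  | cons c cs ih =>
    intro fuel cur acc rest h hf
    have hc : ('\n':Char) ≠ c := fun he => h (he ▸ List.mem_cons_self)
    have hcs : ('\n':Char) ∉ cs := fun he => h (List.mem_cons_of_mem _ he)
    cases fuel with
    | zero => omega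
    | succ f =>
      simp only [List.cons_append] at hf ⊢
      rw [PySem.Chars.splitOn.go]
      rw [if_neg (by simp [List.isPrefixOf, hc])]
      rw [ih f (c :: cur) acc rest hcs (by simp only [List.length_cons] at hf; omega)]
      have harith : f - cs.length - 1 = (f + 1) - (c :: cs).length - 1 := by simp
      rw [harith]
      simp

theorem pv_splitOn_noNl (cs : List Char) (h : '\n' ∉ cs) : PySem.Chars.splitOn cs ['\n'] = [cs] := by
  rw [PySem.Chars.splitOn, pv_go_noSep cs _ _ _ h]
  simp

theorem pv_splitOn_cons (l rest : List Char) (h : '\n' ∉ l) :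
    PySem.Chars.splitOn (l ++ '\n' :: rest) ['\n'] = l :: PySem.Chars.splitOn rest ['\n'] := by
  rw [PySem.Chars.splitOn, PySem.Chars.splitOn]
  rw [pv_go_sep l _ _ _ rest h (by simp)]
  have : (l ++ '\n' :: rest).length + 1 - l.length - 1 = rest.length + 1 := by simp; omega
  rw [this, pv_go_acc]
  simp

theorem pv_go_ne_nil : ∀ (fuel : Nat) (l cur : List Char) (acc : List (List Char)),
    PySem.Chars.splitOn.go ['\n'] fuel l cur acc ≠ [] := by
  intro fuel
  induction fuel with
  | zero => intro l cur acc; rw [PySem.Chars.splitOn.go]; simp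
  | succ f ih =>
    intro l cur acc
    cases l with
    | nil => rw [PySem.Chars.splitOn.go] <;> simp
    | cons c cs =>
      rw [PySem.Chars.splitOn.go]
      split
      · exact ih _ _ _
      · exact ih _ _ _

theorem pv_splitOn_ne_nil (cs : List Char) : PySem.Chars.splitOn cs ['\n'] ≠ [] := by
  rw [PySem.Chars.splitOn]
  exact pv_go_ne_nil _ _ _ _

theorem pvNlRun_eq_length (l : List Char) (h : '\n' ∉ l) : pvNlRun l = l.length := by
  induction l with
  | nil => rfl
  | cons c cs ih =>
    have hc : c ≠ '\n' := fun he => h (he ▸ List.mem_cons_self)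
    simp only [pvNlRun, if_pos hc, List.length_cons,
      ih (fun he => h (List.mem_cons_of_mem _ he))]

theorem pvNlRun_append_nl (l rest : List Char) (h : '\n' ∉ l) :
    pvNlRun (l ++ '\n' :: rest) = l.length := by
  induction l with
  | nil => simp [pvNlRun]
  | cons c cs ih =>
    have hc : c ≠ '\n' := fun he => h (he ▸ List.mem_cons_self)
    simp only [List.cons_append, pvNlRun, if_pos hc, List.length_cons,
      ih (fun he => h (List.mem_cons_of_mem _ he))]

theorem pvWsRun_append_nl (l rest : List Char) :
    pvWsRun (l ++ '\n' :: rest) = pvWsRun l := by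
  induction l with
  | nil => simp [pvWsRun]
  | cons c cs ih =>
    simp only [List.cons_append, pvWsRun, ih]

theorem pvWsRun_eq_length_all (l : List Char) (h : pvWsRun l = l.length) :
    ∀ c ∈ l, PySem.Chars.isspace c = true := by
  induction l with
  | nil => simp
  | cons c cs ih =>
    simp only [pvWsRun, List.length_cons] at h
    by_cases hp : c ≠ '\n' ∧ PySem.Chars.isspace c = true
    · rw [if_pos hp] at h
      intro d hd
      rcases List.mem_cons.mp hd with rfl | hd
      · exact hp.2
      · exact ih (by omega) d hd
    · rw [if_neg hp] at h
      omega

theorem pv_lstrip_drop (l : List Char) (h : '\n' ∉ l) :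
    PySem.Chars.lstrip l = l.drop (pvWsRun l) := by
  induction l with
  | nil => rfl
  | cons c cs ih =>
    have hc : c ≠ '\n' := fun he => h (he ▸ List.mem_cons_self)
    have ih' := ih (fun he => h (List.mem_cons_of_mem _ he))
    by_cases hs : PySem.Chars.isspace c = true
    · show List.dropWhile PySem.Chars.isspace (c :: cs) = List.drop (pvWsRun (c :: cs)) (c :: cs)
      rw [List.dropWhile_cons_of_pos hs,
        show pvWsRun (c :: cs) = pvWsRun cs + 1 from by
          simp only [pvWsRun]; rw [if_pos ⟨hc, hs⟩],
        List.drop_succ_cons]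
      exact ih'
    · show List.dropWhile PySem.Chars.isspace (c :: cs) = List.drop (pvWsRun (c :: cs)) (c :: cs)
      rw [List.dropWhile_cons_of_neg (by simp [hs]),
        show pvWsRun (c :: cs) = 0 from by
          simp only [pvWsRun]; rw [if_neg (by tauto)]]
      rfl

theorem pv_drop_wsRun_head (l : List Char) (h : '\n' ∉ l) (hlt : pvWsRun l < l.length) :
    ∃ c cs', l.drop (pvWsRun l) = c :: cs' ∧ PySem.Chars.isspace c = false := by
  induction l with
  | nil => simp at hlt
  | cons c cs ih =>
    have hc : c ≠ '\n' := fun he => h (he ▸ List.mem_cons_self)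
    by_cases hs : PySem.Chars.isspace c = true
    · have hp : c ≠ '\n' ∧ PySem.Chars.isspace c = true := ⟨hc, hs⟩
      simp only [pvWsRun, if_pos hp, List.length_cons] at hlt ⊢
      simpa using ih (fun he => h (List.mem_cons_of_mem _ he)) (by omega)
    · refine ⟨c, cs, ?_, by simpa using hs⟩
      simp only [pvWsRun]
      rw [if_neg (by tauto)]
      simp

theorem pv_rstrip_ne_nil (m : List Char) (c : Char) (hm : c ∈ m) (hc : PySem.Chars.isspace c = false) :
    PySem.Chars.rstrip m ≠ [] := by
  intro he
  simp only [PySem.Chars.rstrip, List.reverse_eq_nil_iff, List.dropWhile_eq_nil_iff] at he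
  have := he c (List.mem_reverse.mpr hm)
  rw [hc] at this
  exact Bool.false_ne_true this

theorem pv_head_eq_fixA (l : List Char) (hnl : '\n' ∉ l) :
    (if pvWsRun l < l.length then List.replicate ((pvWsRun l / 4) * 4) ' ' else l.take (pvWsRun l)) ++
      (l.drop (pvWsRun l)).take (l.length - pvWsRun l) = pvFixA l := by
  have hle := pvWsRun_le l
  have hlst := pv_lstrip_drop l hnl
  rw [show l.length - pvWsRun l = (l.drop (pvWsRun l)).length by simp, List.take_length]
  by_cases hlt : pvWsRun l < l.length
  · obtain ⟨c, cs', hdrop, hcsp⟩ := pv_drop_wsRun_head l hnl hlt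
    have hstrip : PySem.Chars.strip l ≠ [] := by
      rw [PySem.Chars.strip, hlst, hdrop]
      exact pv_rstrip_ne_nil _ c List.mem_cons_self hcsp
    rw [if_pos hlt, pvFixA, if_pos hstrip, hlst]
    have hlen : PySem.List.len l - PySem.List.len (l.drop (pvWsRun l)) = ((pvWsRun l : Nat) : Int) := by
      simp only [PySem.List.len_eq, List.length_drop]
      omega
    rw [hlen, show (4:Int) = ((4:Nat):Int) from rfl, PySem.Int.floordiv_natCast,
      show ((((pvWsRun l) / 4 : Nat) : Int) * ((4:Nat):Int)).toNat = (pvWsRun l / 4) * 4 from by omega]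
  · have hws : pvWsRun l = l.length := by omega
    have hall := pvWsRun_eq_length_all l hws
    have hnil : l.drop (pvWsRun l) = [] := by rw [hws]; simp
    have hstrip : PySem.Chars.strip l = [] := by
      rw [PySem.Chars.strip, hlst, hnil]
      rfl
    rw [if_neg hlt, pvFixA, if_neg (by simp [hstrip]), hnil, hws]
    simp

theorem pv_nl_decomp (cs : List Char) (hm : '\n' ∈ cs) :
    '\n' ∉ cs.take (pvNlRun cs) ∧ pvNlRun cs < cs.length ∧
      cs = cs.take (pvNlRun cs) ++ '\n' :: cs.drop (pvNlRun cs + 1) := by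
  induction cs with
  | nil => simp at hm
  | cons c cs ih =>
    by_cases hc : c = '\n'
    · subst hc
      refine ⟨by simp [pvNlRun], by simp [pvNlRun], ?_⟩
      simp [pvNlRun]
    · have hm' : '\n' ∈ cs := by
        rcases List.mem_cons.mp hm with he | h
        · exact absurd he.symm hc
        · exact h
      obtain ⟨h1, h2, h3⟩ := ih hm'
      have hr : pvNlRun (c :: cs) = pvNlRun cs + 1 := by
        simp only [pvNlRun]; rw [if_pos hc]
      refine ⟨?_, ?_, ?_⟩
      · rw [hr, List.take_succ_cons]
        intro hmem
        rcases List.mem_cons.mp hmem with he | h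
        · exact hc he.symm
        · exact h1 h
      · rw [hr]; simpa using h2
      · rw [hr, List.take_succ_cons, List.drop_succ_cons]
        simpa using h3

theorem pv_scan_line (l rest : List Char) (hnl : '\n' ∉ l) :
    pvAltScan (l ++ '\n' :: rest) = pvFixA l ++ '\n' :: pvAltScan rest := by
  have hle := pvWsRun_le l
  have hdnl : '\n' ∉ l.drop (pvWsRun l) := fun h => hnl ((List.drop_sublist _ _).mem h)
  rw [pvAltScan]
  rw [pvWsRun_append_nl l rest]
  rw [List.drop_append_of_le_length hle]
  rw [pvNlRun_append_nl _ rest hdnl]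
  rw [List.take_append_of_le_length hle]
  have hlen : (l.drop (pvWsRun l)).length = l.length - pvWsRun l := by simp
  have he : pvWsRun l + (l.drop (pvWsRun l)).length = l.length := by simp; omega
  rw [if_neg (by simp only [he, List.length_append, List.length_cons]; omega)]
  have htake : (l.drop (pvWsRun l) ++ '\n' :: rest).take
      (pvWsRun l + (l.drop (pvWsRun l)).length - pvWsRun l)
      = (l.drop (pvWsRun l)).take (l.length - pvWsRun l) := by
    rw [List.take_append_of_le_length (by omega)]
    congr 1
    omega
  rw [htake]
  have hdrop : (l ++ '\n' :: rest).drop (pvWsRun l + (l.drop (pvWsRun l)).length + 1)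
      = rest := by
    rw [he]
    simp [List.drop_length_add_append]
  rw [hdrop]
  simp only [he]
  rw [pv_head_eq_fixA l hnl]

theorem pv_scan_noNl (cs : List Char) (hm : '\n' ∉ cs) : pvAltScan cs = pvFixA cs := by
  have hle := pvWsRun_le cs
  have hdnl : '\n' ∉ cs.drop (pvWsRun cs) := fun h => hm ((List.drop_sublist _ _).mem h)
  rw [pvAltScan]
  rw [pvNlRun_eq_length _ hdnl]
  have he : pvWsRun cs + (cs.drop (pvWsRun cs)).length = cs.length := by simp; omega
  rw [if_pos he]
  simp only [he]
  exact pv_head_eq_fixA cs hm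

theorem pvAltScan_eq_aux : ∀ (n : Nat) (cs : List Char), cs.length ≤ n →
    pvAltScan cs = PySem.Chars.join ['\n'] ((PySem.Chars.splitOn cs ['\n']).map pvFixA) := by
  intro n
  induction n with
  | zero =>
    intro cs h
    have : cs = [] := List.eq_nil_of_length_eq_zero (by omega)
    subst this
    rw [pv_splitOn_noNl [] (by simp), pv_scan_noNl [] (by simp)]
    simp [PySem.Chars.join_singleton]
  | succ n ih =>
    intro cs hlen
    by_cases hm : '\n' ∈ cs
    · obtain ⟨hnl', hklt, hdec⟩ := pv_nl_decomp cs hm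
      conv_lhs => rw [hdec]
      conv_rhs => rw [hdec]
      rw [pv_scan_line _ _ hnl', pv_splitOn_cons _ _ hnl', List.map_cons]
      have hrest : (cs.drop (pvNlRun cs + 1)).length ≤ n := by
        simp only [List.length_drop]; omega
      rw [ih _ hrest]
      rcases hsp : (PySem.Chars.splitOn (cs.drop (pvNlRun cs + 1)) ['\n']).map pvFixA with _ | ⟨p, ps⟩
      · exact absurd (List.map_eq_nil_iff.mp hsp) (pv_splitOn_ne_nil _)
      · rw [PySem.Chars.join_cons_cons]
        simp
    · rw [pv_splitOn_noNl cs hm, pv_scan_noNl cs hm]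
      simp [PySem.Chars.join_singleton]

theorem pvAltScan_eq (cs : List Char) :
    pvAltScan cs = PySem.Chars.join ['\n'] ((PySem.Chars.splitOn cs ['\n']).map pvFixA) :=
  pvAltScan_eq_aux cs.length cs le_rfl

-- ===== VERDICT (by name: the statement is the Claim_ definition above) =====
theorem fix_indentation_error_py_spec : Claim_equal_fix_indentation_error_py := by
  intro code language error _
  unfold Spec_fix_indentation_error_py fix_indentation_error_py fix_indentation_error_py_alt
  by_cases hl : language == "python"
  · simp only [hl, if_pos]
    have hfold : ∀ (lines : List (List Char)),
        lines.foldl (fun acc line =>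
          if PySem.Chars.strip line ≠ [] then
            let stripped := PySem.Chars.lstrip line
            let indent : Int := PySem.List.len line - PySem.List.len stripped
            let newIndent : Int := PySem.Int.floordiv indent 4 * 4
            acc ++ [List.replicate newIndent.toNat ' ' ++ stripped]
          else acc ++ [line]) ([] : List (List Char)) = lines.map pvFixA := by
      intro lines
      have hfun : (fun (acc : List (List Char)) line =>
          if PySem.Chars.strip line ≠ [] then
            let stripped := PySem.Chars.lstrip line
            let indent : Int := PySem.List.len line - PySem.List.len stripped
            let newIndent : Int := PySem.Int.floordiv indent 4 * 4
            acc ++ [List.replicate newIndent.toNat ' ' ++ stripped]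
          else acc ++ [line]) = (fun acc line => acc ++ [pvFixA line]) := by
        funext acc line
        rw [pvFixA]
        split <;> rfl
      rw [hfun, PySem.List.foldl_append_singleton_eq_map]
      rfl
    rw [hfold, pvAltScan_eq]
  · simp [hl]
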